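-- pv_equiv track=rewrite | github.com/tothedarktowercame/futon3 | scripts/embed_patterns_glove.py | split_arg_blocks
-- ===== SOURCE A (Python) =====
-- from typing import Dict, Iterable, List, Optional, Tuple
--
-- def split_arg_blocks(text: str) -> List[str]:
--     lines = text.splitlines()
--     blocks: List[str] = []
--     current: List[str] = []
--     has_arg = False
--     for line in lines:
--         if line.startswith("@arg "):
--             if has_arg:
--                 blocks.append("\n".join(current))
--                 current = [line]
--             else:
--                 current = [line]
--                 has_arg = True
--         else:
--             current.append(line)
--     if current:
--         blocks.append("\n".join(current))
--     return blocks
-- ===== SOURCE B (Python) =====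
-- from typing import List
--
-- def split_arg_blocks(text: str) -> List[str]:
--     lines = text.splitlines()
--     blocks: List[str] = []
--     acc: List[str] = []
--     for line in reversed(lines):
--         acc = [line] + acc
--         if line.startswith("@arg "):
--             blocks = ["\n".join(acc)] + blocks
--             acc = []
--     if blocks:
--         return blocks
--     return ["\n".join(lines)] if lines else []
-- ===== Notes on version B (the rewrite author's own statement) =====
-- stated objective: alternative
-- what changed: B scans the lines in reverse, emitting a block each time an @arg line is reached (so blocks are built back-to-front with no has_arg flag and no end-of-loop flush), and handles the no-@arg case by joining all lines at the end; A scans forward with a has_arg flag, a growing current buffer and a final flush.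
import Mathlib
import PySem

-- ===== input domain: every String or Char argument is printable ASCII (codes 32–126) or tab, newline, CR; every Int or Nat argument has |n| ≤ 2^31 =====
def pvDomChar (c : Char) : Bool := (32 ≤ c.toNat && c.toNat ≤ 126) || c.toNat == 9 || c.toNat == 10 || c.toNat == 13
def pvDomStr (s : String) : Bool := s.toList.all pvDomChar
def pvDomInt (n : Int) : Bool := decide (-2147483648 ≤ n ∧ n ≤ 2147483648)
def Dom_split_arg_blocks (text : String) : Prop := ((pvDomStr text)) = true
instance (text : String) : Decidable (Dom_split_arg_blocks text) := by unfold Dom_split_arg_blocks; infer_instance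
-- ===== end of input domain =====

-- B replaces A's forward scan (has_arg flag, growing buffer, final flush) by a reverse scan
-- that emits a block whenever an @arg line is reached; same return value, no speed claim.

-- ===== PORT A =====
def split_arg_blocks (text : String) : List String :=
  let lines := PySem.Str.splitlines text
  let st := lines.foldl
    (fun (st : List String × List String × Bool) line =>
      if PySem.Str.startswith line "@arg " then
        if st.2.2 then (st.1 ++ [PySem.Str.join "\n" st.2.1], [line], st.2.2)
        else (st.1, [line], true)
      else (st.1, st.2.1 ++ [line], st.2.2))
    ([], [], false)
  if st.2.1.isEmpty then st.1 else st.1 ++ [PySem.Str.join "\n" st.2.1]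

-- ===== PORT B =====
def split_arg_blocks_alt (text : String) : List String :=
  let lines := PySem.Str.splitlines text
  let st := lines.reverse.foldl
    (fun (st : List String × List String) line =>
      let acc := line :: st.2
      if PySem.Str.startswith line "@arg " then (PySem.Str.join "\n" acc :: st.1, [])
      else (st.1, acc))
    ([], [])
  if st.1.isEmpty then (if lines.isEmpty then [] else [PySem.Str.join "\n" lines]) else st.1

-- ===== PRECONDITION & SPEC =====
def Spec_split_arg_blocks (text : String) (out : List String) : Prop := out = split_arg_blocks_alt text
instance (text : String) (out : List String) : Decidable (Spec_split_arg_blocks text out) := by unfold Spec_split_arg_blocks; infer_instance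

-- ===== CLAIM (what is proved, stated in full; the proofs are below) =====
def Claim_equal_split_arg_blocks : Prop := ∀ (text : String), Dom_split_arg_blocks text → Spec_split_arg_blocks text (split_arg_blocks text)

-- ===== LEMMAS AND PROOFS =====

-- the @arg test
def pvP (l : String) : Bool := PySem.Str.startswith l "@arg "

-- the groups A produces once the first @arg line has been seen (cur = current buffer)
def pvGroup : List String → List String → List (List String)
  | cur, [] => [cur]
  | cur, l :: ls => if pvP l then cur :: pvGroup [l] ls else pvGroup (cur ++ [l]) ls

-- the groups of a whole line list: skip to the first @arg line, then group
def pvSkip : List String → List (List String)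
  | [] => []
  | l :: ls => if pvP l then pvGroup [l] ls else pvSkip ls

-- A's loop body and flush
def pvFA (st : List String × List String × Bool) (line : String) : List String × List String × Bool :=
  if PySem.Str.startswith line "@arg " then
    if st.2.2 then (st.1 ++ [PySem.Str.join "\n" st.2.1], [line], st.2.2)
    else (st.1, [line], true)
  else (st.1, st.2.1 ++ [line], st.2.2)

def pvFinish (st : List String × List String × Bool) : List String :=
  if st.2.1.isEmpty then st.1 else st.1 ++ [PySem.Str.join "\n" st.2.1]

-- B's loop body
def pvGB (st : List String × List String) (line : String) : List String × List String :=
  if PySem.Str.startswith line "@arg " then (PySem.Str.join "\n" (line :: st.2) :: st.1, [])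
  else (st.1, line :: st.2)

lemma pvGroup_char (ls : List String) : ∀ cur,
    pvGroup cur ls = (cur ++ ls.takeWhile (fun l => !pvP l)) :: pvSkip (ls.dropWhile (fun l => !pvP l)) := by
  induction ls with
  | nil => intro cur; simp [pvGroup, pvSkip]
  | cons l ls ih =>
      intro cur
      by_cases h : pvP l = true
      · simp [pvGroup, pvSkip, h]
      · simp [pvGroup, h, ih]

lemma pvSkip_dropWhile (ls : List String) :
    pvSkip (ls.dropWhile (fun l => !pvP l)) = pvSkip ls := by
  induction ls with
  | nil => rfl
  | cons l ls ih =>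
      by_cases h : pvP l = true
      · simp [pvSkip, h]
      · simp [pvSkip, h, ih]

lemma pvSkip_of_no_arg (ls : List String) (h : ls.any pvP = false) : pvSkip ls = [] := by
  induction ls with
  | nil => rfl
  | cons l ls ih =>
      simp only [List.any_cons, Bool.or_eq_false_iff] at h
      simp [pvSkip, h.1, ih h.2]

lemma pvSkip_ne_nil (ls : List String) (h : ls.any pvP = true) : pvSkip ls ≠ [] := by
  induction ls with
  | nil => simp at h
  | cons l ls ih =>
      by_cases hl : pvP l = true
      · simp [pvSkip, hl, pvGroup_char]
      · simp only [List.any_cons, hl, Bool.false_or] at h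
        simp [pvSkip, hl, ih h]

-- A after the first @arg line: the flushed fold is the groups
lemma pvA2 (ls : List String) : ∀ blocks cur, cur ≠ [] →
    pvFinish (ls.foldl pvFA (blocks, cur, true)) = blocks ++ (pvGroup cur ls).map (PySem.Str.join "\n") := by
  induction ls with
  | nil =>
      intro blocks cur hc
      simp [pvFinish, pvGroup, List.isEmpty_iff, hc]
  | cons l ls ih =>
      intro blocks cur hc
      by_cases h : pvP l = true
      · have h' : PySem.Str.startswith l "@arg " = true := h
        simp only [List.foldl_cons, pvFA, h', reduceIte]
        rw [ih (blocks ++ [PySem.Str.join "\n" cur]) [l] (by simp)]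
        simp [pvGroup, h]
      · have h' : PySem.Str.startswith l "@arg " = false := by simpa [pvP] using h
        simp only [List.foldl_cons, pvFA, h', Bool.false_eq_true, reduceIte]
        rw [ih blocks (cur ++ [l]) (by simp)]
        simp [pvGroup, h]

-- A before any @arg line
lemma pvA1 (ls : List String) : ∀ cur,
    pvFinish (ls.foldl pvFA ([], cur, false)) =
      if ls.any pvP then (pvSkip ls).map (PySem.Str.join "\n")
      else if cur ++ ls = [] then [] else [PySem.Str.join "\n" (cur ++ ls)] := by
  induction ls with
  | nil =>
      intro cur
      simp only [List.foldl_nil, List.any_nil, Bool.false_eq_true, reduceIte, List.append_nil]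
      cases cur <;> simp [pvFinish]
  | cons l ls ih =>
      intro cur
      by_cases h : pvP l = true
      · have h' : PySem.Str.startswith l "@arg " = true := h
        simp only [List.foldl_cons, pvFA, h', Bool.false_eq_true, reduceIte]
        rw [pvA2 ls [] [l] (by simp)]
        simp [pvSkip, h]
      · have h' : PySem.Str.startswith l "@arg " = false := by simpa [pvP] using h
        simp only [List.foldl_cons, pvFA, h', Bool.false_eq_true, reduceIte]
        rw [ih (cur ++ [l])]
        have hsk : pvSkip (l :: ls) = pvSkip ls := by simp [pvSkip, h]
        simp [h, hsk]

-- B's fold, as a foldr: result is (groups, prefix before the first @arg line)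
lemma pvB1 (ls : List String) :
    ls.foldr (fun l st => pvGB st l) ([], []) =
      ((pvSkip ls).map (PySem.Str.join "\n"), ls.takeWhile (fun l => !pvP l)) := by
  induction ls with
  | nil => rfl
  | cons l ls ih =>
      rw [List.foldr_cons, ih]
      by_cases h : pvP l = true
      · have h' : PySem.Str.startswith l "@arg " = true := h
        simp only [pvGB, h', reduceIte]
        have hg : pvSkip (l :: ls) = pvGroup [l] ls := by simp [pvSkip, h]
        rw [hg, pvGroup_char, pvSkip_dropWhile]
        simp [h]
      · have h' : PySem.Str.startswith l "@arg " = false := by simpa [pvP] using h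
        simp only [pvGB, h', Bool.false_eq_true, reduceIte]
        have hsk : pvSkip (l :: ls) = pvSkip ls := by simp [pvSkip, h]
        simp [hsk, h]

-- ===== VERDICT (by name: the statement is the Claim_ definition above) =====
theorem split_arg_blocks_spec : Claim_equal_split_arg_blocks := by
  intro text _
  show split_arg_blocks text = split_arg_blocks_alt text
  have key : ∀ ls : List String,
      pvFinish (ls.foldl pvFA ([], [], false)) =
        (if (ls.reverse.foldl (fun st l => pvGB st l) ([], [])).1.isEmpty then
          (if ls.isEmpty then [] else [PySem.Str.join "\n" ls])
        else (ls.reverse.foldl (fun st l => pvGB st l) ([], [])).1) := by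
    intro ls
    rw [List.foldl_reverse, pvB1, pvA1 ls []]
    simp only [List.nil_append]
    by_cases h : ls.any pvP = true
    · have hne := pvSkip_ne_nil ls h
      rw [if_pos h, if_neg (by simpa [List.isEmpty_iff] using hne)]
    · simp only [Bool.not_eq_true] at h
      rw [if_neg (by simp [h]), pvSkip_of_no_arg ls h]
      cases ls <;> simp
  exact key (PySem.Str.splitlines text)
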